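-- pv_equiv track=rewrite | github.com/NeetaCode/Practice_Problems | Assesment_Cisco_sum.py | funcSum
-- ===== SOURCE A (Python) =====
-- def funcSum(list1, list2):
--     i = 0
--     j = 0
--     carry = 0
--     result = []
--
--     # Add digit by digit
--     while i < len(list1) or j < len(list2) or carry:
--         d1 = list1[i] if i < len(list1) else 0
--         d2 = list2[j] if j < len(list2) else 0
--
--         total = d1 + d2 + carry
--         result.append(total % 10)
--         carry = total // 10
--
--         i += 1
--         j += 1
--
--     return result
-- ===== SOURCE B (Python) =====
-- def funcSum(list1, list2):
--     # value of each little-endian digit list, then extract decimal digits and zero-pad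
--     v1 = 0
--     for d in reversed(list1):
--         v1 = v1 * 10 + d
--     v2 = 0
--     for d in reversed(list2):
--         v2 = v2 * 10 + d
--     v = v1 + v2
--     digits = []
--     while v:
--         digits.append(v % 10)
--         v //= 10
--     digits.extend([0] * (max(len(list1), len(list2)) - len(digits)))
--     return digits
-- ===== Notes on version B (the rewrite author's own statement) =====
-- stated objective: simpler
-- what changed: Replaces the digit-by-digit carry loop with a value-based algorithm: fold each list into one integer, add them, peel the decimal digits off the sum, and zero-pad to the longer input's length.
import Mathlib
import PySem

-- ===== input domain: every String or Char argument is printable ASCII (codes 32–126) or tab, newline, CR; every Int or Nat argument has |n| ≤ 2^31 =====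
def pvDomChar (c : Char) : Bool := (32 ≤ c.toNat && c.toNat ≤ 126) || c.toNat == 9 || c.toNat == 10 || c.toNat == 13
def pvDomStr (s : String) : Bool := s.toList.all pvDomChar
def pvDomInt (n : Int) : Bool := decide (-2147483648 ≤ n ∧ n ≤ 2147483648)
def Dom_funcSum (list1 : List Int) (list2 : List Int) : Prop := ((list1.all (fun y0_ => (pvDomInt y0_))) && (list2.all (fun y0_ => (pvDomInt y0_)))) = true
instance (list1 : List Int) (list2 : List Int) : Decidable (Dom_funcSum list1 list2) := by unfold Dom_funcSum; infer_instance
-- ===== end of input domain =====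

-- B replaces A's digit-by-digit carry loop by "fold to an integer, add, re-extract digits, zero-pad" (objective: simpler).
-- Pre_ excludes inputs whose combined value is negative: there A's while loop never terminates (carry stays negative), and B's digit-extraction loop never terminates either.


-- ===== PORT A =====
-- tail of A's while loop once both lists are exhausted: "while carry: append carry%10; carry //= 10".
-- The '0 < c' guard only totalizes it: for negative carry the Python loop never terminates (outside Pre_).
def funcSumCarry (c : Int) : List Int :=
  if _h : 0 < c then PySem.Int.mod c 10 :: funcSumCarry (PySem.Int.floordiv c 10) else []
  termination_by c.toNat
  decreasing_by
    rw [PySem.Int.floordiv_eq_ediv_of_pos (by norm_num)]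
    omega

-- A's while loop: i and j advance together, so it is recursion on the two lists with the carry as state.
def funcSumGo : List Int → List Int → Int → List Int
  | [], [], c => funcSumCarry c
  | d1 :: t1, [], c =>
      PySem.Int.mod (d1 + 0 + c) 10 :: funcSumGo t1 [] (PySem.Int.floordiv (d1 + 0 + c) 10)
  | [], d2 :: t2, c =>
      PySem.Int.mod (0 + d2 + c) 10 :: funcSumGo [] t2 (PySem.Int.floordiv (0 + d2 + c) 10)
  | d1 :: t1, d2 :: t2, c =>
      PySem.Int.mod (d1 + d2 + c) 10 :: funcSumGo t1 t2 (PySem.Int.floordiv (d1 + d2 + c) 10)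

def funcSum (list1 : List Int) (list2 : List Int) : List Int :=
  funcSumGo list1 list2 0

-- ===== PORT B =====
-- Source B: "v = 0; for d in reversed(l): v = v*10 + d"
def altVal (l : List Int) : Int :=
  List.foldl (fun acc d => acc * 10 + d) 0 l.reverse

-- Source B: "while v: digits.append(v % 10); v //= 10".  The '0 < v' guard only totalizes it:
-- for negative v the Python loop never terminates (outside Pre_).
def altDigits (v : Int) : List Int :=
  if _h : 0 < v then PySem.Int.mod v 10 :: altDigits (PySem.Int.floordiv v 10) else []
  termination_by v.toNat
  decreasing_by
    rw [PySem.Int.floordiv_eq_ediv_of_pos (by norm_num)]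
    omega

def funcSum_alt (list1 : List Int) (list2 : List Int) : List Int :=
  let v := altVal list1 + altVal list2
  let ds := altDigits v
  ds ++ List.replicate (max list1.length list2.length - ds.length) 0

-- ===== PRECONDITION & SPEC =====
-- value of a little-endian digit list (for the precondition only)
def pvVal (l : List Int) : Int := l.foldr (fun d acc => d + 10 * acc) 0

-- Pre_ excludes exactly the inputs whose combined value is negative: there A's while loop
-- never terminates (the carry stays negative forever), so A never returns.
def Pre_funcSum (list1 : List Int) (list2 : List Int) : Prop :=
  0 ≤ pvVal list1 + pvVal list2
instance (list1 : List Int) (list2 : List Int) : Decidable (Pre_funcSum list1 list2) := by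
  unfold Pre_funcSum; infer_instance

def pvWitness_funcSum : List Int × List Int := ([9, 9], [1])

def Spec_funcSum (list1 : List Int) (list2 : List Int) (out : List Int) : Prop := out = funcSum_alt list1 list2
instance (list1 : List Int) (list2 : List Int) (out : List Int) : Decidable (Spec_funcSum list1 list2 out) := by unfold Spec_funcSum; infer_instance

-- ===== CLAIM (what is proved, stated in full; the proofs are below) =====
def Claim_equal_funcSum : Prop := ∀ (list1 : List Int) (list2 : List Int), Dom_funcSum list1 list2 → Pre_funcSum list1 list2 → Spec_funcSum list1 list2 (funcSum list1 list2)

-- ===== LEMMAS AND PROOFS =====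

lemma altVal_nil : altVal [] = 0 := rfl

lemma altVal_cons (d : Int) (t : List Int) : altVal (d :: t) = 10 * altVal t + d := by
  simp [altVal, List.foldl_append]
  ring

lemma pvVal_eq_altVal (l : List Int) : pvVal l = altVal l := by
  induction l with
  | nil => rfl
  | cons d t ih => simp [pvVal, List.foldr] at *; rw [altVal_cons, ih]; ring

lemma digitsStep (c : Int) (h : 0 < c) :
    altDigits c = PySem.Int.mod c 10 :: altDigits (PySem.Int.floordiv c 10) := by
  rw [altDigits.eq_def, dif_pos h]

lemma digitsNil (c : Int) (h : ¬ 0 < c) : altDigits c = [] := by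
  rw [altDigits.eq_def, dif_neg h]

lemma carry_eq_digits (c : Int) : funcSumCarry c = altDigits c := by
  fun_induction funcSumCarry c with
  | case1 c h ih => rw [ih, digitsStep c h]
  | case2 c h => rw [digitsNil c h]

lemma floordiv_shift (W t : Int) :
    PySem.Int.floordiv (10 * W + t) 10 = W + PySem.Int.floordiv t 10 := by
  rw [PySem.Int.floordiv_eq_ediv_of_pos (by norm_num),
      PySem.Int.floordiv_eq_ediv_of_pos (by norm_num)]
  omega

lemma mod_shift (W t : Int) :
    PySem.Int.mod (10 * W + t) 10 = PySem.Int.mod t 10 := by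
  rw [PySem.Int.mod_eq_emod_of_pos (by norm_num),
      PySem.Int.mod_eq_emod_of_pos (by norm_num)]
  omega

lemma floordiv10_nonneg (V : Int) (h : 0 ≤ V) : 0 ≤ PySem.Int.floordiv V 10 := by
  rw [PySem.Int.floordiv_eq_ediv_of_pos (by norm_num)]
  omega

-- one digit-extraction step of the padded digit list, for nonnegative V
lemma pad_cons (V : Int) (hV : 0 ≤ V) (n : ℕ) :
    altDigits V ++ List.replicate ((n + 1) - (altDigits V).length) 0
      = PySem.Int.mod V 10 ::
        (altDigits (PySem.Int.floordiv V 10)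
          ++ List.replicate (n - (altDigits (PySem.Int.floordiv V 10)).length) 0) := by
  rcases lt_or_eq_of_le hV with hpos | hzero
  · rw [digitsStep V hpos]
    simp
  · rw [← hzero]
    have h0 : altDigits 0 = [] := by rw [altDigits.eq_def]; simp
    have hd : PySem.Int.floordiv 0 10 = 0 := by
      rw [PySem.Int.floordiv_eq_ediv_of_pos (by norm_num)]; simp
    have hm : PySem.Int.mod 0 10 = 0 := by
      rw [PySem.Int.mod_eq_emod_of_pos (by norm_num)]; simp
    rw [hd, hm, h0]
    simp [List.replicate_succ]

-- main invariant: A's loop computes the padded digits of the remaining value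
lemma go_eq (l1 : List Int) : ∀ (l2 : List Int) (c : Int),
    0 ≤ altVal l1 + altVal l2 + c →
    funcSumGo l1 l2 c
      = altDigits (altVal l1 + altVal l2 + c)
        ++ List.replicate (max l1.length l2.length
              - (altDigits (altVal l1 + altVal l2 + c)).length) 0 := by
  induction l1 with
  | nil =>
    intro l2
    induction l2 with
    | nil =>
      intro c h
      simp only [funcSumGo, altVal_nil, zero_add, List.length_nil, Nat.max_self,
        Nat.zero_sub, List.replicate_zero, List.append_nil]
      exact carry_eq_digits c
    | cons d2 t2 ih =>
      intro c h
      have hV : altVal [] + altVal (d2 :: t2) + c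
          = 10 * (altVal [] + altVal t2) + (0 + d2 + c) := by
        rw [altVal_cons]; simp [altVal_nil]; ring
      have hq : altVal [] + altVal t2 + PySem.Int.floordiv (0 + d2 + c) 10
          = PySem.Int.floordiv (altVal [] + altVal (d2 :: t2) + c) 10 := by
        rw [hV, floordiv_shift]
      have hnn : 0 ≤ altVal [] + altVal t2 + PySem.Int.floordiv (0 + d2 + c) 10 := by
        rw [hq]; exact floordiv10_nonneg _ h
      simp only [funcSumGo]
      rw [ih _ hnn, hq]
      have hm : PySem.Int.mod (0 + d2 + c) 10
          = PySem.Int.mod (altVal [] + altVal (d2 :: t2) + c) 10 := by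
        rw [hV, mod_shift]
      rw [hm]
      have hlen : max ([] : List Int).length (d2 :: t2).length
          = max ([] : List Int).length t2.length + 1 := by simp
      rw [hlen, ← pad_cons _ h]
  | cons d1 t1 ih =>
    intro l2 c h
    cases l2 with
    | nil =>
      have hV : altVal (d1 :: t1) + altVal [] + c
          = 10 * (altVal t1 + altVal []) + (d1 + 0 + c) := by
        rw [altVal_cons]; simp [altVal_nil]; ring
      have hq : altVal t1 + altVal [] + PySem.Int.floordiv (d1 + 0 + c) 10
          = PySem.Int.floordiv (altVal (d1 :: t1) + altVal [] + c) 10 := by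
        rw [hV, floordiv_shift]
      have hnn : 0 ≤ altVal t1 + altVal [] + PySem.Int.floordiv (d1 + 0 + c) 10 := by
        rw [hq]; exact floordiv10_nonneg _ h
      simp only [funcSumGo]
      rw [ih _ _ hnn, hq]
      have hm : PySem.Int.mod (d1 + 0 + c) 10
          = PySem.Int.mod (altVal (d1 :: t1) + altVal [] + c) 10 := by
        rw [hV, mod_shift]
      rw [hm]
      have hlen : max (d1 :: t1).length ([] : List Int).length
          = max t1.length ([] : List Int).length + 1 := by simp
      rw [hlen, ← pad_cons _ h]
    | cons d2 t2 =>
      have hV : altVal (d1 :: t1) + altVal (d2 :: t2) + c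
          = 10 * (altVal t1 + altVal t2) + (d1 + d2 + c) := by
        rw [altVal_cons, altVal_cons]; ring
      have hq : altVal t1 + altVal t2 + PySem.Int.floordiv (d1 + d2 + c) 10
          = PySem.Int.floordiv (altVal (d1 :: t1) + altVal (d2 :: t2) + c) 10 := by
        rw [hV, floordiv_shift]
      have hnn : 0 ≤ altVal t1 + altVal t2 + PySem.Int.floordiv (d1 + d2 + c) 10 := by
        rw [hq]; exact floordiv10_nonneg _ h
      simp only [funcSumGo]
      rw [ih _ _ hnn, hq]
      have hm : PySem.Int.mod (d1 + d2 + c) 10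
          = PySem.Int.mod (altVal (d1 :: t1) + altVal (d2 :: t2) + c) 10 := by
        rw [hV, mod_shift]
      rw [hm]
      have hlen : max (d1 :: t1).length (d2 :: t2).length
          = max t1.length t2.length + 1 := by
        simp [Nat.succ_max_succ]
      rw [hlen, ← pad_cons _ h]

-- ===== VERDICT (by name: the statement is the Claim_ definition above) =====
theorem funcSum_spec : Claim_equal_funcSum := by
  intro l1 l2 _hdom hpre
  unfold Spec_funcSum funcSum funcSum_alt
  have h : 0 ≤ altVal l1 + altVal l2 + 0 := by
    have := hpre
    unfold Pre_funcSum at this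
    rw [pvVal_eq_altVal, pvVal_eq_altVal] at this
    omega
  rw [go_eq l1 l2 0 h]
  simp
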